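-- pv_equiv track=rewrite | github.com/hsprabhakar/EmailSummarizer | quickstart.py | filterHeaders
-- ===== SOURCE A (Python) =====
-- def filterHeaders(headers):
--     """
--     Extracts and returns specific email headers: 'From', 'Subject', and 'Date'.
--
--     Args:
--         headers (list of dict): A list of dictionaries representing email headers,
--                                 where each dictionary contains 'name' and 'value' keys.
--
--     Returns:
--         list: A list containing the 'From', 'Subject', and 'Date' values, respectively,
--               extracted from the headers. If any of these headers are not present,
--               their corresponding value in the returned list will be None.
--     """
--     filteredHeaders = []
--     sender = subject = date = None
--     for header in headers:
--         if header['name'] == 'From':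
--             sender = header['value']
--         if header['name'] == 'Subject':
--             subject = header['value']
--         if header['name'] == 'Date':
--             date = header['value']
--     filteredHeaders.append(sender)
--     filteredHeaders.append(subject)
--     filteredHeaders.append(date)
--     return filteredHeaders
-- ===== SOURCE B (Python) =====
-- def filterHeaders(headers):
--     def last(name):
--         for header in reversed(headers):
--             if header['name'] == name:
--                 return header['value']
--         return None
--     return [last(n) for n in ('From', 'Subject', 'Date')]
-- ===== Notes on version B (the rewrite author's own statement) =====
-- stated objective: alternative
-- what changed: Replaces A's single forward accumulation pass with three variables by three independent backward searches (first match in reversed(headers) with early return == A's last-assignment-wins), assembled by a comprehension over the three names.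
import Mathlib
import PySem

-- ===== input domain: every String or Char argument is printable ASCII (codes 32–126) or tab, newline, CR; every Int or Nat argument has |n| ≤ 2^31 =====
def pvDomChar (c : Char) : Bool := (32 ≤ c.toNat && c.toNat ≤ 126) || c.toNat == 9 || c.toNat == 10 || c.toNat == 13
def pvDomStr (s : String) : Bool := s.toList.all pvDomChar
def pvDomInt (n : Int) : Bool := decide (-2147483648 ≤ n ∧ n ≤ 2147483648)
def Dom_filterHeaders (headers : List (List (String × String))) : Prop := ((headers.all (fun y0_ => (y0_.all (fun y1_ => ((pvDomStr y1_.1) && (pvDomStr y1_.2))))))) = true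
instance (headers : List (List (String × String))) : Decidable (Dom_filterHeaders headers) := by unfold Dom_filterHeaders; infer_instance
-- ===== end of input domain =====

-- B replaces A's single forward pass with three backward early-exit searches; alternative structure, not faster.

-- ===== PORT A =====
-- loop body of A: three independent 'if' assignments over the state (sender, subject, date)
def pvStepA (st : Option String × Option String × Option String) (header : List (String × String)) :
    Option String × Option String × Option String :=
  let st := if (PySem.Dict.mk header).get? "name" == some "From" then
      ((PySem.Dict.mk header).get? "value", st.2.1, st.2.2) else st
  let st := if (PySem.Dict.mk header).get? "name" == some "Subject" then
      (st.1, (PySem.Dict.mk header).get? "value", st.2.2) else st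
  let st := if (PySem.Dict.mk header).get? "name" == some "Date" then
      (st.1, st.2.1, (PySem.Dict.mk header).get? "value") else st
  st

def filterHeaders (headers : List (List (String × String))) : List (Option String) :=
  let st := headers.foldl pvStepA (none, none, none)
  [st.1, st.2.1, st.2.2]

-- ===== PORT B =====
-- B's inner 'last': scan the reversed list, return the first match's 'value' (none = no match,
-- or — outside Pre_ — a matching header without a 'value' key, where Python raises)
def pvLast (name : String) (hs : List (List (String × String))) : Option String :=
  match hs with
  | [] => none
  | h :: rest =>
      if (PySem.Dict.mk h).get? "name" == some name then (PySem.Dict.mk h).get? "value"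
      else pvLast name rest

def filterHeaders_alt (headers : List (List (String × String))) : List (Option String) :=
  ["From", "Subject", "Date"].map (fun n => pvLast n headers.reverse)

-- ===== PRECONDITION & SPEC =====
-- Pre_ excludes exactly the inputs where Python A raises KeyError: a header without a 'name' key,
-- or a header named From/Subject/Date without a 'value' key.
def Pre_filterHeaders (headers : List (List (String × String))) : Prop :=
  (headers.all (fun h =>
    match (PySem.Dict.mk h).get? "name" with
    | none => false
    | some n =>
        !(n == "From" || n == "Subject" || n == "Date") ||
        ((PySem.Dict.mk h).get? "value").isSome)) = true
instance (headers : List (List (String × String))) : Decidable (Pre_filterHeaders headers) := by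
  unfold Pre_filterHeaders; infer_instance

def pvWitness_filterHeaders : (List (List (String × String))) :=
  [[("name", "From"), ("value", "a@b.c")], [("name", "Subject"), ("value", "hi")], [("name", "X-Id"), ("other", "1")]]

def Spec_filterHeaders (headers : List (List (String × String))) (out : List (Option String)) : Prop := out = filterHeaders_alt headers
instance (headers : List (List (String × String))) (out : List (Option String)) : Decidable (Spec_filterHeaders headers out) := by unfold Spec_filterHeaders; infer_instance

-- ===== CLAIM (what is proved, stated in full; the proofs are below) =====
def Claim_equal_filterHeaders : Prop := ∀ (headers : List (List (String × String))), Dom_filterHeaders headers → Pre_filterHeaders headers → Spec_filterHeaders headers (filterHeaders headers)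

-- ===== LEMMAS AND PROOFS =====

-- A's final three accumulators are the first matches of the reversed list
lemma pv_components (hs : List (List (String × String))) :
    (hs.foldl pvStepA (none, none, none)).1 = pvLast "From" hs.reverse ∧
    (hs.foldl pvStepA (none, none, none)).2.1 = pvLast "Subject" hs.reverse ∧
    (hs.foldl pvStepA (none, none, none)).2.2 = pvLast "Date" hs.reverse := by
  induction hs using List.reverseRecOn with
  | nil => simp [pvLast]
  | append_singleton hs' h ih =>
    obtain ⟨i1, i2, i3⟩ := ih
    simp only [List.foldl_append, List.foldl_cons, List.foldl_nil, List.reverse_append,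
      List.reverse_cons, List.reverse_nil, List.nil_append, List.cons_append, pvLast]
    simp only [pvStepA]
    cases hn : (PySem.Dict.mk h).get? "name" with
    | none => simp [i1, i2, i3]
    | some n =>
      by_cases hF : n = "From" <;> by_cases hS : n = "Subject" <;> by_cases hD : n = "Date" <;>
        simp_all

-- ===== VERDICT (by name: the statement is the Claim_ definition above) =====
theorem filterHeaders_spec : Claim_equal_filterHeaders := by
  intro headers _ _
  unfold Spec_filterHeaders filterHeaders filterHeaders_alt
  obtain ⟨h1, h2, h3⟩ := pv_components headers
  simp [List.map, h1, h2, h3]
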